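-- pv_equiv track=rewrite | github.com/Cassidy777/Compressed_a11y | Compressed_a11y/domain_detector.py | _score_vlc
-- ===== SOURCE A (Python) =====
-- from typing import List, Dict, Any, Tuple
--
-- def _score_vlc(nodes: List[Dict[str, Any]]) -> int:
--     """
--     VLC のスコアリング
--     - メニューバー: Media / Playback / Audio / Video / Subtitle / Tools / View / Help
--     - ウィンドウタイトル: "VLC media player"
--     - 再生時間っぽい "--:--" が下部に出る
--     """
--     score = 0
--
--     vlc_menu_items = {
--         "media", "playback", "audio", "video", "subtitle", "tools", "view", "help"
--     }
--
--     menu_hit = 0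
--     time_like_hit = 0
--
--     for n in nodes:
--         tag = (n.get("tag") or "").lower()
--         name = (n.get("name") or "").strip()
--         text = (n.get("text") or "").strip()
--
--         lname = name.lower()
--         ltext = text.lower()
--
--         # 1) 決定打: ウィンドウタイトル/メニューに "VLC media player"
--         # a11y 例だと tag=menu の name が "VLC media player"
--         if "vlc media player" in lname or "vlc media player" in ltext:
--             score += 25
--
--         # 2) メニューバー（menu-item）: Media/Playback/... が揃う
--         if tag == "menu-item" and lname in vlc_menu_items:
--             menu_hit += 1
--             score += 4  # 1個ごとに加点（揃えば強い）
--
--         # 3) 下部の時間表示っぽい "--:--"（name に入ることが多い）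
--         # 例: label  --:--
--         if tag in ("label", "text") and ("--:--" in name or "--:--" in text):
--             time_like_hit += 1
--             if time_like_hit <= 2:
--                 score += 3  # 左右で2つ出る想定なので上限2
--
--         # 4) 右上に "vlc" が出ることがある（OS上部バー等）
--         if tag == "menu" and lname == "vlc":
--             score += 4
--
--     # メニューがある程度揃っていたらボーナス（誤検知を一気に減らす）
--     if menu_hit >= 6:
--         score += 12
--     elif menu_hit >= 4:
--         score += 6
--
--     return score
-- ===== SOURCE B (Python) =====
-- from typing import List, Dict, Any
--
-- _VLC_MENU_ITEMS = {
--     "media", "playback", "audio", "video", "subtitle", "tools", "view", "help"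
-- }
--
--
-- def _fields(n):
--     tag = (n.get("tag") or "").lower()
--     name = (n.get("name") or "").strip()
--     text = (n.get("text") or "").strip()
--     return tag, name, text
--
--
-- def _is_title(t):
--     tag, name, text = t
--     return "vlc media player" in name.lower() or "vlc media player" in text.lower()
--
--
-- def _is_menu_hit(t):
--     tag, name, text = t
--     return tag == "menu-item" and name.lower() in _VLC_MENU_ITEMS
--
--
-- def _is_time_like(t):
--     tag, name, text = t
--     return tag in ("label", "text") and ("--:--" in name or "--:--" in text)
--
--
-- def _is_vlc_menu(t):
--     tag, name, text = t
--     return tag == "menu" and name.lower() == "vlc"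
--
--
-- def _score_vlc(nodes: List[Dict[str, Any]]) -> int:
--     triples = [_fields(n) for n in nodes]
--     title = sum(1 for t in triples if _is_title(t))
--     menu_hit = sum(1 for t in triples if _is_menu_hit(t))
--     time_like = sum(1 for t in triples if _is_time_like(t))
--     vlc_menu = sum(1 for t in triples if _is_vlc_menu(t))
--     bonus = 12 if menu_hit >= 6 else (6 if menu_hit >= 4 else 0)
--     return 25 * title + 4 * menu_hit + 3 * min(2, time_like) + 4 * vlc_menu + bonus
-- ===== Notes on version B (the rewrite author's own statement) =====
-- stated objective: simpler
-- what changed: Replaced the single fused stateful loop (running score, menu_hit, time_like_hit with an inline cap) with four independent counting passes combined by one closed-form expression 25*title + 4*menu_hit + 3*min(2,time_like) + 4*vlc_menu + bonus.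
import Mathlib
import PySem

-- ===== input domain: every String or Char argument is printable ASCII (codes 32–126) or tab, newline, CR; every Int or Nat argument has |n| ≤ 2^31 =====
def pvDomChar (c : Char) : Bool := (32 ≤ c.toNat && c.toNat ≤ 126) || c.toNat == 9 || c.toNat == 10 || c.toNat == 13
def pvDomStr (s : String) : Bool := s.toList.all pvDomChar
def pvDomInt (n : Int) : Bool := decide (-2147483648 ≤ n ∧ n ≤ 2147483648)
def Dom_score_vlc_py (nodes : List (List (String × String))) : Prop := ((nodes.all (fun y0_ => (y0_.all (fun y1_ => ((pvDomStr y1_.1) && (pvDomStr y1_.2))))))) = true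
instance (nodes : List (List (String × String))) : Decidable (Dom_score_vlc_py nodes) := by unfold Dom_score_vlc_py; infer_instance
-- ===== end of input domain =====

-- B replaces A's single fused stateful loop with four independent counting passes
-- combined by one closed-form expression (objective: simpler).


-- ===== PORT A =====
-- (n.get(k) or "") : a missing key and an empty value both give ""
def pvField (n : List (String × String)) (k : String) : String :=
  ((PySem.Dict.mk n).get? k).getD ""

def pvVlcMenuItems : PySem.Set String :=
  PySem.Set.ofList ["media", "playback", "audio", "video", "subtitle", "tools", "view", "help"]

-- one iteration of A's loop over state (score, menu_hit, time_like_hit)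
def pvStepA (st : Int × Int × Int) (n : List (String × String)) : Int × Int × Int :=
  let tag := PySem.Str.lower (pvField n "tag")
  let name := PySem.Str.strip (pvField n "name")
  let text := PySem.Str.strip (pvField n "text")
  let lname := PySem.Str.lower name
  let ltext := PySem.Str.lower text
  let score := st.1
  let menu_hit := st.2.1
  let time_like_hit := st.2.2
  let score := if PySem.Str.isIn "vlc media player" lname || PySem.Str.isIn "vlc media player" ltext then score + 25 else score
  let menu_hit2 := if tag == "menu-item" && pvVlcMenuItems.contains lname then menu_hit + 1 else menu_hit
  let score := if tag == "menu-item" && pvVlcMenuItems.contains lname then score + 4 else score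
  let time_like_hit2 := if (tag == "label" || tag == "text") && (PySem.Str.isIn "--:--" name || PySem.Str.isIn "--:--" text) then time_like_hit + 1 else time_like_hit
  let score := if (tag == "label" || tag == "text") && (PySem.Str.isIn "--:--" name || PySem.Str.isIn "--:--" text) then (if time_like_hit2 ≤ 2 then score + 3 else score) else score
  let score := if tag == "menu" && lname == "vlc" then score + 4 else score
  (score, menu_hit2, time_like_hit2)

def score_vlc_py (nodes : List (List (String × String))) : Int :=
  let st := nodes.foldl pvStepA (0, 0, 0)
  let score := st.1
  let menu_hit := st.2.1
  if menu_hit ≥ 6 then score + 12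
  else if menu_hit ≥ 4 then score + 6
  else score

-- ===== PORT B =====
def pvFieldsB (n : List (String × String)) : String × String × String :=
  (PySem.Str.lower (pvField n "tag"),
   PySem.Str.strip (pvField n "name"),
   PySem.Str.strip (pvField n "text"))

def pvIsTitle (t : String × String × String) : Bool :=
  PySem.Str.isIn "vlc media player" (PySem.Str.lower t.2.1) || PySem.Str.isIn "vlc media player" (PySem.Str.lower t.2.2)

def pvIsMenuHit (t : String × String × String) : Bool :=
  t.1 == "menu-item" && pvVlcMenuItems.contains (PySem.Str.lower t.2.1)

def pvIsTimeLike (t : String × String × String) : Bool :=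
  (t.1 == "label" || t.1 == "text") && (PySem.Str.isIn "--:--" t.2.1 || PySem.Str.isIn "--:--" t.2.2)

def pvIsVlcMenu (t : String × String × String) : Bool :=
  t.1 == "menu" && PySem.Str.lower t.2.1 == "vlc"

def score_vlc_py_alt (nodes : List (List (String × String))) : Int :=
  let triples := nodes.map pvFieldsB
  let title : Int := triples.countP pvIsTitle
  let menu_hit : Int := triples.countP pvIsMenuHit
  let time_like : Int := triples.countP pvIsTimeLike
  let vlc_menu : Int := triples.countP pvIsVlcMenu
  let bonus : Int := if menu_hit ≥ 6 then 12 else if menu_hit ≥ 4 then 6 else 0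
  25 * title + 4 * menu_hit + 3 * min 2 time_like + 4 * vlc_menu + bonus

-- ===== PRECONDITION & SPEC =====
def Spec_score_vlc_py (nodes : List (List (String × String))) (out : Int) : Prop := out = score_vlc_py_alt nodes
instance (nodes : List (List (String × String))) (out : Int) : Decidable (Spec_score_vlc_py nodes out) := by unfold Spec_score_vlc_py; infer_instance

-- ===== CLAIM (what is proved, stated in full; the proofs are below) =====
def Claim_equal_score_vlc_py : Prop := ∀ (nodes : List (List (String × String))), Dom_score_vlc_py nodes → Spec_score_vlc_py nodes (score_vlc_py nodes)

-- ===== LEMMAS AND PROOFS =====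

-- invariant of A's loop: the fold computes the four counts of B plus the starting state
theorem pvLoopA_eq (nodes : List (List (String × String))) :
    ∀ (s m t : Int), 0 ≤ t →
      nodes.foldl pvStepA (s, m, t) =
        (s + 25 * ((nodes.map pvFieldsB).countP pvIsTitle : Int)
           + 4 * ((nodes.map pvFieldsB).countP pvIsMenuHit : Int)
           + 3 * (min 2 (t + ((nodes.map pvFieldsB).countP pvIsTimeLike : Int)) - min 2 t)
           + 4 * ((nodes.map pvFieldsB).countP pvIsVlcMenu : Int),
         m + ((nodes.map pvFieldsB).countP pvIsMenuHit : Int),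
         t + ((nodes.map pvFieldsB).countP pvIsTimeLike : Int)) := by
  induction nodes with
  | nil => intro s m t ht; simp
  | cons n rest ih =>
    intro s m t ht
    have hstep : pvStepA (s, m, t) n =
        (s + (if pvIsTitle (pvFieldsB n) then 25 else 0)
           + (if pvIsMenuHit (pvFieldsB n) then 4 else 0)
           + (if pvIsTimeLike (pvFieldsB n) then (if t + 1 ≤ 2 then 3 else 0) else 0)
           + (if pvIsVlcMenu (pvFieldsB n) then 4 else 0),
         m + (if pvIsMenuHit (pvFieldsB n) then 1 else 0),
         t + (if pvIsTimeLike (pvFieldsB n) then 1 else 0)) := by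
      cases h3 : pvIsTimeLike (pvFieldsB n) <;>
        simp only [pvIsTimeLike, pvFieldsB] at h3 <;>
        simp only [pvStepA, pvIsTitle, pvIsMenuHit, pvIsTimeLike, pvIsVlcMenu, pvFieldsB, h3] <;>
        split_ifs <;> simp only [Prod.mk.injEq, and_true, true_and, and_self] <;> omega
    rw [List.foldl_cons, hstep, List.map_cons]
    by_cases h1 : pvIsTitle (pvFieldsB n) <;>
      by_cases h2 : pvIsMenuHit (pvFieldsB n) <;>
      by_cases h3 : pvIsTimeLike (pvFieldsB n) <;>
      by_cases h4 : pvIsVlcMenu (pvFieldsB n) <;>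
      simp only [h1, h2, h3, h4, if_true, if_false, List.countP_cons, ite_true, ite_false] <;>
      rw [ih _ _ _ (by omega)] <;>
      simp only [Prod.mk.injEq, and_true, true_and, and_self] <;>
      push_cast <;>
      omega

-- ===== VERDICT (by name: the statement is the Claim_ definition above) =====
theorem score_vlc_py_spec : Claim_equal_score_vlc_py := by
  intro nodes _
  unfold Spec_score_vlc_py score_vlc_py score_vlc_py_alt
  rw [pvLoopA_eq nodes 0 0 0 le_rfl]
  simp only []
  set c1 : Int := ((nodes.map pvFieldsB).countP pvIsTitle : Int)
  set c2 : Int := ((nodes.map pvFieldsB).countP pvIsMenuHit : Int)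
  set c3 : Int := ((nodes.map pvFieldsB).countP pvIsTimeLike : Int)
  set c4 : Int := ((nodes.map pvFieldsB).countP pvIsVlcMenu : Int)
  have h3 : (0:Int) ≤ c3 := by positivity
  split_ifs <;> omega
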